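-- pv_equiv track=rewrite | github.com/pat-jj/RAS | llm_training_data_process/generate_subqueries_selfrag.py | extract_paragraphs_and_answer
-- ===== SOURCE A (Python) =====
-- def extract_paragraphs_and_answer(output: str) -> tuple:
--     """Extract paragraphs and answer from SelfRAG output format"""
--     paragraphs = []
--     answer = None
--
--     if '[No Retrieval]' in output:
--         # Extract answer for no-retrieval cases
--         start_idx = output.find('[No Retrieval]') + len('[No Retrieval]')
--         end_idx = output.find('[Utility:')
--         answer = output[start_idx:end_idx].strip()
--         return [], answer
--
--     # Extract paragraphs
--     current_pos = 0
--     while True: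
--         start_idx = output.find('<paragraph>', current_pos)
--         if start_idx == -1:
--             break
--         end_idx = output.find('</paragraph>', start_idx)
--         if end_idx == -1:
--             break
--         paragraph = output[start_idx + len('<paragraph>'):end_idx].strip()
--         paragraphs.append(paragraph)
--         current_pos = end_idx + 1
--
--     # Extract answer
--     for marker in ['[Relevant]', '[Irrelevant]']:
--         if marker in output:
--             start_idx = output.find(marker) + len(marker)
--             end_idx = output.find('[Utility:', start_idx)
--             if end_idx != -1:
--                 answer = output[start_idx:end_idx].strip()
--                 break
--
--     return paragraphs, answer
-- ===== SOURCE B (Python) =====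
-- def _answer_after(output, marker):
--     """Answer text between `marker` and the next '[Utility:' after it, or None."""
--     if marker not in output:
--         return None
--     start = output.find(marker) + len(marker)
--     end = output.find('[Utility:', start)
--     if end == -1:
--         return None
--     return output[start:end].strip()
--
--
-- def extract_paragraphs_and_answer(output: str) -> tuple:
--     """Extract paragraphs and answer from SelfRAG output format"""
--     if '[No Retrieval]' in output:
--         start = output.find('[No Retrieval]') + len('[No Retrieval]')
--         return [], output[start:output.find('[Utility:')].strip()
--
--     # Consume the string left to right with partition instead of index bookkeeping.
--     paragraphs = []
--     rest = output
--     while True: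
--         _, sep, rest = rest.partition('<paragraph>')
--         if not sep:
--             break
--         body, sep, rest = rest.partition('</paragraph>')
--         if not sep:
--             break
--         paragraphs.append(body.strip())
--
--     answer = _answer_after(output, '[Relevant]')
--     if answer is None:
--         answer = _answer_after(output, '[Irrelevant]')
--     return paragraphs, answer
-- ===== Notes on version B (the rewrite author's own statement) =====
-- stated objective: idiomatic
-- what changed: The manual while-loop with absolute find positions and current_pos bookkeeping is replaced by a partition-style scanner that consumes the string left to right, and the marker for-loop with break by a small _answer_after helper chained on None.
import Mathlib
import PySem

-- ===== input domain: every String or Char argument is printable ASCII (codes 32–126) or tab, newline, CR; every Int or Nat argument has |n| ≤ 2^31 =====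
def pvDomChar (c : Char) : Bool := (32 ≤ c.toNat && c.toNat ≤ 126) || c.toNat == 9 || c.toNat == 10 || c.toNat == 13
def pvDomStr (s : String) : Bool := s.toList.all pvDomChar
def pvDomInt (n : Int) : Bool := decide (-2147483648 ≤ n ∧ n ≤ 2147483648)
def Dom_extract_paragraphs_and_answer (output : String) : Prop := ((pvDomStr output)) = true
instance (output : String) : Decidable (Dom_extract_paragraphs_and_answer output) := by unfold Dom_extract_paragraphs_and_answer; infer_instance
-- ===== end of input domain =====

-- B replaces A's index-bookkeeping find loop by a partition-style scanner that consumes the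
-- string left to right, and the marker loop by a small helper chained on None (objective: idiomatic).

-- the Python string literals both programs use
def pvOpenTag : List Char := ['<','p','a','r','a','g','r','a','p','h','>']
def pvCloseTag : List Char := ['<','/','p','a','r','a','g','r','a','p','h','>']
def pvNRTag : List Char := ['[','N','o',' ','R','e','t','r','i','e','v','a','l',']']
def pvUtilTag : List Char := ['[','U','t','i','l','i','t','y',':']
def pvRelTag : List Char := ['[','R','e','l','e','v','a','n','t',']']
def pvIrrelTag : List Char := ['[','I','r','r','e','l','e','v','a','n','t',']']

-- ===== PORT A =====
-- facts cited by the termination proofs of the loops below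
lemma pv_findFrom_ne_le (s sub : List Char) (k : Nat)
    (h : PySem.Chars.findFrom s sub (k : Int) none ≠ -1) : k ≤ s.length := by
  by_contra hk
  apply h
  simp only [PySem.Chars.findFrom]
  split_ifs with h1 h2 <;> omega

lemma pv_stepA (cs : List Char) (pos : Nat)
    (hsi : PySem.Chars.findFrom cs pvOpenTag (pos : Int) none ≠ -1)
    (hei : PySem.Chars.findFrom cs pvCloseTag (PySem.Chars.findFrom cs pvOpenTag (pos : Int) none) none ≠ -1) :
    pos ≤ (PySem.Chars.findFrom cs pvCloseTag (PySem.Chars.findFrom cs pvOpenTag (pos : Int) none) none).toNat ∧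
    (PySem.Chars.findFrom cs pvCloseTag (PySem.Chars.findFrom cs pvOpenTag (pos : Int) none) none).toNat + 1 ≤ cs.length := by
  have hp := pv_findFrom_ne_le cs pvOpenTag pos hsi
  obtain ⟨h1, h2, -⟩ := PySem.Chars.findFrom_natCast_spec cs pvOpenTag pos hp hsi
  set si := PySem.Chars.findFrom cs pvOpenTag (pos : Int) none with hsidef
  have hsi0 : 0 ≤ si := le_trans (by exact_mod_cast Int.natCast_nonneg pos) h1
  have hsieq : si = ((si.toNat : Nat) : Int) := (Int.toNat_of_nonneg hsi0).symm
  rw [hsieq] at hei h2 ⊢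
  have hsl : si.toNat ≤ cs.length := pv_findFrom_ne_le cs pvCloseTag si.toNat hei
  obtain ⟨h3, h4, -⟩ := PySem.Chars.findFrom_natCast_spec cs pvCloseTag si.toNat hsl hei
  set ei := PySem.Chars.findFrom cs pvCloseTag ((si.toNat : Nat) : Int) none with heidef
  have hei0 : 0 ≤ ei := le_trans (Int.natCast_nonneg _) h3
  have hlen := h4.length_le
  simp only [List.length_drop, pvCloseTag, List.length_cons, List.length_nil] at hlen
  constructor <;> omega

lemma pv_stepB (r : List Char)
    (hi : PySem.Chars.find r pvOpenTag ≠ -1)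
    (hj : PySem.Chars.find (r.drop ((PySem.Chars.find r pvOpenTag).toNat + 11)) pvCloseTag ≠ -1) :
    (PySem.Chars.find r pvOpenTag).toNat + 11 +
      ((PySem.Chars.find (r.drop ((PySem.Chars.find r pvOpenTag).toNat + 11)) pvCloseTag).toNat + 12) ≤ r.length := by
  have h0 : (0:Int) ≤ PySem.Chars.find r pvOpenTag := by
    have := PySem.Chars.neg_one_le_find r pvOpenTag; omega
  obtain ⟨hp, -⟩ := PySem.Chars.find_spec h0
  have hl1 := hp.length_le
  set s2 := r.drop ((PySem.Chars.find r pvOpenTag).toNat + 11) with hs2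
  have h0' : (0:Int) ≤ PySem.Chars.find s2 pvCloseTag := by
    have := PySem.Chars.neg_one_le_find s2 pvCloseTag; omega
  obtain ⟨hp', -⟩ := PySem.Chars.find_spec h0'
  have hl2 := hp'.length_le
  have e1 : pvOpenTag.length = 11 := rfl
  have e2 : pvCloseTag.length = 12 := rfl
  rw [e1] at hl1; rw [e2] at hl2
  have hs2len : s2.length = r.length - ((PySem.Chars.find r pvOpenTag).toNat + 11) := by
    rw [hs2]; simp
  simp only [List.length_drop] at hl1 hl2
  omega

-- A's while loop: absolute positions, output.find(tag, current_pos), current_pos = end_idx + 1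
def pvLoopA (cs : List Char) (pos : Nat) (acc : List (List Char)) : List (List Char) :=
  if hsi : PySem.Chars.findFrom cs pvOpenTag (pos : Int) none = -1 then acc
  else if hei : PySem.Chars.findFrom cs pvCloseTag (PySem.Chars.findFrom cs pvOpenTag (pos : Int) none) none = -1 then acc
  else
    pvLoopA cs ((PySem.Chars.findFrom cs pvCloseTag (PySem.Chars.findFrom cs pvOpenTag (pos : Int) none) none).toNat + 1)
      (acc ++ [PySem.Chars.strip (PySem.Chars.slice cs
        (some (PySem.Chars.findFrom cs pvOpenTag (pos : Int) none + 11))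
        (some (PySem.Chars.findFrom cs pvCloseTag (PySem.Chars.findFrom cs pvOpenTag (pos : Int) none) none)))])
termination_by cs.length + 1 - pos
decreasing_by
  have := pv_stepA cs pos hsi hei
  omega

-- A's for loop over the two markers, with break
def pvAnswerLoopA (t : List Char) : List (List Char) → Option (List Char)
  | [] => none
  | m :: ms =>
    if PySem.Chars.isIn m t then
      if PySem.Chars.findFrom t pvUtilTag (PySem.Chars.find t m + (m.length : Int)) none ≠ -1 then
        some (PySem.Chars.strip (PySem.Chars.slice t
          (some (PySem.Chars.find t m + (m.length : Int)))
          (some (PySem.Chars.findFrom t pvUtilTag (PySem.Chars.find t m + (m.length : Int)) none))))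
      else pvAnswerLoopA t ms
    else pvAnswerLoopA t ms

def extract_paragraphs_and_answer (output : String) : List String × Option String :=
  let t := output.toList
  if PySem.Chars.isIn pvNRTag t then
    ([], some (String.ofList (PySem.Chars.strip (PySem.Chars.slice t
        (some (PySem.Chars.find t pvNRTag + 14))
        (some (PySem.Chars.find t pvUtilTag))))))
  else
    ((pvLoopA t 0 []).map String.ofList, (pvAnswerLoopA t [pvRelTag, pvIrrelTag]).map String.ofList)

-- ===== PORT B =====
-- Source B's partition-based scanner. `head, sep, rest = rest.partition(tag)` is ported by hand, exactly:
-- sep is nonempty iff find rest tag ≠ -1; then the part before the separator is `take`, the part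
-- after it is `drop (find + tag length)`.
def pvLoopB (r : List Char) (acc : List (List Char)) : List (List Char) :=
  if hi : PySem.Chars.find r pvOpenTag = -1 then acc
  else if hj : PySem.Chars.find (r.drop ((PySem.Chars.find r pvOpenTag).toNat + 11)) pvCloseTag = -1 then acc
  else
    pvLoopB ((r.drop ((PySem.Chars.find r pvOpenTag).toNat + 11)).drop
        ((PySem.Chars.find (r.drop ((PySem.Chars.find r pvOpenTag).toNat + 11)) pvCloseTag).toNat + 12))
      (acc ++ [PySem.Chars.strip ((r.drop ((PySem.Chars.find r pvOpenTag).toNat + 11)).take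
        (PySem.Chars.find (r.drop ((PySem.Chars.find r pvOpenTag).toNat + 11)) pvCloseTag).toNat)])
termination_by r.length
decreasing_by
  have h1 := pv_stepB r hi hj
  simp only [List.length_drop]
  omega

-- Source B's _answer_after helper
def pvAnswerAfterB (output m : List Char) : Option (List Char) :=
  if PySem.Chars.isIn m output then
    if PySem.Chars.findFrom output pvUtilTag (PySem.Chars.find output m + (m.length : Int)) none = -1 then none
    else
      some (PySem.Chars.strip (PySem.Chars.slice output
        (some (PySem.Chars.find output m + (m.length : Int)))
        (some (PySem.Chars.findFrom output pvUtilTag (PySem.Chars.find output m + (m.length : Int)) none))))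
  else none

def extract_paragraphs_and_answer_alt (output : String) : List String × Option String :=
  let t := output.toList
  if PySem.Chars.isIn pvNRTag t then
    ([], some (String.ofList (PySem.Chars.strip (PySem.Chars.slice t
        (some (PySem.Chars.find t pvNRTag + 14))
        (some (PySem.Chars.find t pvUtilTag))))))
  else
    let ans := match pvAnswerAfterB t pvRelTag with
      | some a => some a
      | none => pvAnswerAfterB t pvIrrelTag
    ((pvLoopB t []).map String.ofList, ans.map String.ofList)

-- ===== PRECONDITION & SPEC =====
def Spec_extract_paragraphs_and_answer (output : String) (out : List String × Option String) : Prop := out = extract_paragraphs_and_answer_alt output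
instance (output : String) (out : List String × Option String) : Decidable (Spec_extract_paragraphs_and_answer output out) := by unfold Spec_extract_paragraphs_and_answer; infer_instance

-- ===== CLAIM (what is proved, stated in full; the proofs are below) =====
def Claim_equal_extract_paragraphs_and_answer : Prop := ∀ (output : String), Dom_extract_paragraphs_and_answer output → Spec_extract_paragraphs_and_answer output (extract_paragraphs_and_answer output)

-- ===== LEMMAS AND PROOFS =====

-- A's loop re-expressed on the suffix of the string it still scans (proof-only helper)
def pvLoopAS (t : List Char) (acc : List (List Char)) : List (List Char) :=
  if hi : PySem.Chars.find t pvOpenTag = -1 then acc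
  else if hj : PySem.Chars.findFrom t pvCloseTag (PySem.Chars.find t pvOpenTag) none = -1 then acc
  else
    pvLoopAS (t.drop ((PySem.Chars.findFrom t pvCloseTag (PySem.Chars.find t pvOpenTag) none).toNat + 1))
      (acc ++ [PySem.Chars.strip (PySem.Chars.slice t
        (some (PySem.Chars.find t pvOpenTag + 11))
        (some (PySem.Chars.findFrom t pvCloseTag (PySem.Chars.find t pvOpenTag) none)))])
termination_by t.length
decreasing_by
  have h0 : (0:Int) ≤ PySem.Chars.find t pvOpenTag := by
    have := PySem.Chars.neg_one_le_find t pvOpenTag; omega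
  have hl := (PySem.Chars.find_spec h0).1.length_le
  have e1 : pvOpenTag.length = 11 := rfl
  rw [e1] at hl
  simp only [List.length_drop] at hl ⊢
  omega

-- findFrom from a nonnegative start, written through find on the dropped suffix
lemma pv_ff (cs sub : List Char) (p : Nat) (hp : p ≤ cs.length) :
    PySem.Chars.findFrom cs sub (p:Int) none =
      if PySem.Chars.find (cs.drop p) sub = -1 then -1
      else ((p + (PySem.Chars.find (cs.drop p) sub).toNat : Nat) : Int) := by
  rw [PySem.Chars.findFrom_natCast cs sub p hp]
  split_ifs with h
  · rfl
  · have := PySem.Chars.neg_one_le_find (cs.drop p) sub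
    omega

-- find = findFrom k when no occurrence starts before k
lemma pv_find_eq_findFrom (t sub : List Char) (k : Nat) (hk : k ≤ t.length)
    (h : ∀ m, m < k → ¬ sub <+: t.drop m) :
    PySem.Chars.find t sub = PySem.Chars.findFrom t sub (k : Int) none := by
  by_cases hf : PySem.Chars.find t sub = -1
  · rw [hf]
    rw [PySem.Chars.find_eq_neg_one_iff] at hf
    rw [eq_comm, PySem.Chars.findFrom_natCast_eq_neg_one_iff t sub k hk]
    intro hin
    exact hf (hin.trans (List.drop_suffix k t).isInfix)
  · have h0 : (0:Int) ≤ PySem.Chars.find t sub := by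
      have := PySem.Chars.neg_one_le_find t sub; omega
    obtain ⟨hp, hmin⟩ := PySem.Chars.find_spec h0
    have hge : k ≤ (PySem.Chars.find t sub).toNat := by
      by_contra hlt
      exact h _ (by omega) hp
    have hne : PySem.Chars.findFrom t sub (k : Int) none ≠ -1 := by
      rw [Ne, PySem.Chars.findFrom_natCast_eq_neg_one_iff t sub k hk, not_not]
      have : t.drop (PySem.Chars.find t sub).toNat = (t.drop k).drop ((PySem.Chars.find t sub).toNat - k) := by
        rw [List.drop_drop]; congr 1; omega
      rw [this] at hp
      exact hp.isInfix.trans (List.drop_suffix _ _).isInfix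
    obtain ⟨hg1, hg2, hg3⟩ := PySem.Chars.findFrom_natCast_spec t sub k hk hne
    have hg0 : (0:Int) ≤ PySem.Chars.findFrom t sub (k:Int) none := le_trans (Int.natCast_nonneg k) hg1
    rcases lt_trichotomy (PySem.Chars.find t sub).toNat (PySem.Chars.findFrom t sub (k:Int) none).toNat with hlt | heq | hgt
    · exact absurd hp (hg3 _ hge hlt)
    · omega
    · exact absurd hg2 (hmin _ hgt)

-- shift a find across a leading block in which no occurrence can start
lemma pv_find_append_shift (u r sub : List Char)
    (h : ∀ m, m < u.length → ¬ sub <+: (u ++ r).drop m) :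
    PySem.Chars.find (u ++ r) sub =
      if PySem.Chars.find r sub = -1 then -1 else (u.length : Int) + PySem.Chars.find r sub := by
  rw [pv_find_eq_findFrom (u ++ r) sub u.length (by simp) h,
    PySem.Chars.findFrom_natCast (u ++ r) sub u.length (by simp)]
  rw [List.drop_left]

def pvCloseTail : List Char := ['/','p','a','r','a','g','r','a','p','h','>']

-- '<paragraph>' cannot start strictly inside the tail of a just-consumed '</paragraph>'
lemma pv_noOpenInTail (r : List Char) : ∀ m, m < 11 → ¬ pvOpenTag <+: (pvCloseTail ++ r).drop m := by
  intro m hm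
  interval_cases m <;> simp [pvOpenTag, pvCloseTail, List.cons_prefix_cons]

-- '</paragraph>' cannot start strictly inside a '<paragraph>' occurrence
lemma pv_noCloseInOpen (s2 : List Char) : ∀ m, m < 11 → ¬ pvCloseTag <+: (pvOpenTag ++ s2).drop m := by
  intro m hm
  interval_cases m <;> simp [pvOpenTag, pvCloseTag, List.cons_prefix_cons]

-- A's positional loop equals its suffix form
lemma pv_loopA_shift (cs : List Char) (p : Nat) (acc : List (List Char)) (hp : p ≤ cs.length) :
    pvLoopA cs p acc = pvLoopAS (cs.drop p) acc := by
  induction hn : cs.length + 1 - p using Nat.strong_induction_on generalizing p acc with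
  | _ n IH =>
  subst hn
  have hff1 := pv_ff cs pvOpenTag p hp
  by_cases h1 : PySem.Chars.find (cs.drop p) pvOpenTag = -1
  · rw [pvLoopA, pvLoopAS]
    simp [hff1, h1]
  · set i := (PySem.Chars.find (cs.drop p) pvOpenTag).toNat with hidef
    have hi0 : (0:Int) ≤ PySem.Chars.find (cs.drop p) pvOpenTag := by
      have := PySem.Chars.neg_one_le_find (cs.drop p) pvOpenTag; omega
    have hieq : PySem.Chars.find (cs.drop p) pvOpenTag = (i : Int) := (Int.toNat_of_nonneg hi0).symm
    have hsi : PySem.Chars.findFrom cs pvOpenTag (p:Int) none = ((p + i : Nat) : Int) := by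
      rw [hff1]; rw [if_neg h1]
    have hopen := (PySem.Chars.find_spec hi0).1
    have hlen1 : p + i + 11 ≤ cs.length := by
      have := hopen.length_le
      have e1 : pvOpenTag.length = 11 := rfl
      rw [e1] at this
      simp only [List.length_drop, ← hidef] at this
      omega
    have hdd : (cs.drop p).drop i = cs.drop (p + i) := by
      simp [List.drop_drop]
    have hff2 := pv_ff cs pvCloseTag (p+i) (by omega)
    have hffAS := pv_ff (cs.drop p) pvCloseTag i (by simp only [List.length_drop]; omega)
    rw [hdd] at hffAS
    by_cases h2 : PySem.Chars.find (cs.drop (p+i)) pvCloseTag = -1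
    · rw [pvLoopA, pvLoopAS]
      rw [hsi]
      simp only [hieq] at hffAS ⊢
      rw [hff2, hffAS]
      simp [h2]
    · set j := (PySem.Chars.find (cs.drop (p+i)) pvCloseTag).toNat with hjdef
      have hj0 : (0:Int) ≤ PySem.Chars.find (cs.drop (p+i)) pvCloseTag := by
        have := PySem.Chars.neg_one_le_find (cs.drop (p+i)) pvCloseTag; omega
      have hclose := (PySem.Chars.find_spec hj0).1
      have hlen2 : p + i + j + 12 ≤ cs.length := by
        have := hclose.length_le
        have e2 : pvCloseTag.length = 12 := rfl
        rw [e2] at this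
        simp only [List.length_drop, ← hjdef] at this
        omega
      have hei : PySem.Chars.findFrom cs pvCloseTag ((p + i : Nat) : Int) none = ((p + i + j : Nat) : Int) := by
        rw [hff2, if_neg h2]
      have heiAS : PySem.Chars.findFrom (cs.drop p) pvCloseTag ((i : Nat) : Int) none = ((i + j : Nat) : Int) := by
        rw [hffAS, if_neg h2]
      rw [pvLoopA, pvLoopAS]
      rw [hsi, hei]
      simp only [hieq, heiAS]
      rw [dif_neg (by omega), dif_neg (by omega), dif_neg (by exact_mod_cast (by omega : ((p+i:Nat):Int) ≠ -1)), dif_neg (by omega)]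
      have hcast : (((p+i+j : Nat):Int)).toNat = p+i+j := Int.toNat_natCast _
      have hcast2 : (((i+j:Nat):Int)).toNat = i+j := Int.toNat_natCast _
      rw [hcast, hcast2]
      have c1 : ((p+i:Nat):Int) + 11 = ((p+i+11:Nat):Int) := by push_cast; ring
      have c2 : ((i:Nat):Int) + 11 = ((i+11:Nat):Int) := by push_cast; ring
      have hslice : PySem.Chars.slice cs (some (((p+i:Nat):Int) + 11)) (some ((p+i+j:Nat):Int)) =
          PySem.Chars.slice (cs.drop p) (some (((i:Nat):Int) + 11)) (some ((i+j:Nat):Int)) := by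
        rw [c1, c2, PySem.Chars.slice_eq_listSlice, PySem.Chars.slice_eq_listSlice,
            PySem.List.slice_natCast, PySem.List.slice_natCast, List.drop_drop]
        congr 1 <;> omega
      have hdrop : List.drop (i+j+1) (List.drop p cs) = List.drop (p+i+j+1) cs := by
        rw [List.drop_drop]
        congr 1 <;> omega
      rw [hslice, hdrop]
      exact IH (cs.length + 1 - (p+i+j+1)) (by omega) (p+i+j+1) _ (by omega) rfl

-- A's suffix loop equals B's partition loop (the consumed close-tag tail is carried as `u`)
lemma pv_loops_eq (r : List Char) (acc : List (List Char)) (u : List Char)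
    (hu : u = [] ∨ u = pvCloseTail) :
    pvLoopAS (u ++ r) acc = pvLoopB r acc := by
  induction hn : r.length using Nat.strong_induction_on generalizing r acc u with
  | _ n IH =>
  subst hn
  have hnoopen : ∀ m, m < u.length → ¬ pvOpenTag <+: (u ++ r).drop m := by
    rcases hu with h | h <;> subst h
    · intro m hm; simp at hm
    · intro m hm
      exact pv_noOpenInTail r m (by simpa [pvCloseTail] using hm)
  have hshift1 := pv_find_append_shift u r pvOpenTag hnoopen
  by_cases hA : PySem.Chars.find r pvOpenTag = -1
  · rw [pvLoopAS, pvLoopB]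
    rw [dif_pos (by rw [hshift1, if_pos hA]), dif_pos hA]
  · set i := (PySem.Chars.find r pvOpenTag).toNat with hidef
    have hi0 : (0:Int) ≤ PySem.Chars.find r pvOpenTag := by
      have := PySem.Chars.neg_one_le_find r pvOpenTag; omega
    have hieq : PySem.Chars.find r pvOpenTag = (i : Int) := (Int.toNat_of_nonneg hi0).symm
    have hopen := (PySem.Chars.find_spec hi0).1
    rw [← hidef] at hopen
    have hil : i + 11 ≤ r.length := by
      have := hopen.length_le
      have e1 : pvOpenTag.length = 11 := rfl
      rw [e1] at this
      simp only [List.length_drop] at this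
      omega
    set s2 := r.drop (i + 11) with hs2def
    have hE : r.drop i = pvOpenTag ++ s2 := by
      conv_lhs => rw [← List.prefix_iff_eq_append.1 hopen]
      rw [show pvOpenTag.length = 11 from rfl, List.drop_drop]
    have hsival : PySem.Chars.find (u ++ r) pvOpenTag = ((u.length + i : Nat) : Int) := by
      rw [hshift1, if_neg hA, hieq]
      push_cast
      ring
    have hui_le : u.length + i ≤ (u ++ r).length := by
      simp only [List.length_append]
      omega
    have hffc := pv_ff (u ++ r) pvCloseTag (u.length + i) hui_le
    have hdropui : (u ++ r).drop (u.length + i) = r.drop i := List.drop_length_add_append i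
    rw [hdropui, hE, pv_find_append_shift pvOpenTag s2 pvCloseTag (pv_noCloseInOpen s2)] at hffc
    by_cases hB : PySem.Chars.find s2 pvCloseTag = -1
    · rw [pvLoopAS, pvLoopB]
      rw [dif_neg (show ¬PySem.Chars.find (u ++ r) pvOpenTag = -1 by rw [hsival]; omega),
        dif_pos (show PySem.Chars.findFrom (u ++ r) pvCloseTag (PySem.Chars.find (u ++ r) pvOpenTag) none = -1 by
          rw [hsival, hffc]; simp [hB]),
        dif_neg hA, dif_pos hB]
    · set j := (PySem.Chars.find s2 pvCloseTag).toNat with hjdef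
      have hj0 : (0:Int) ≤ PySem.Chars.find s2 pvCloseTag := by
        have := PySem.Chars.neg_one_le_find s2 pvCloseTag
        omega
      have hjeq : PySem.Chars.find s2 pvCloseTag = (j : Int) := (Int.toNat_of_nonneg hj0).symm
      have hclose := (PySem.Chars.find_spec hj0).1
      rw [← hjdef] at hclose
      have hjl : j + 12 ≤ s2.length := by
        have := hclose.length_le
        have e2 : pvCloseTag.length = 12 := rfl
        rw [e2] at this
        simp only [List.length_drop] at this
        omega
      have heival : PySem.Chars.findFrom (u ++ r) pvCloseTag ((u.length + i : Nat) : Int) none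
          = ((u.length + i + 11 + j : Nat) : Int) := by
        rw [hffc, hjeq]
        simp only [show pvOpenTag.length = 11 from rfl]
        rw [if_neg (by omega : ¬((j:Int) = -1))]
        rw [show ((11:Nat):Int) + (j:Int) = ((11 + j : Nat) : Int) by push_cast; ring]
        rw [if_neg (by omega : ¬(((11 + j : Nat):Int) = -1))]
        rw [Int.toNat_natCast]
        omega
      have hs2len : s2.length = r.length - (i + 11) := by
        rw [hs2def]
        simp
      have hslice : PySem.Chars.slice (u ++ r) (some (((u.length + i : Nat) : Int) + 11)) (some ((u.length + i + 11 + j : Nat) : Int)) = s2.take j := by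
        rw [show ((u.length + i : Nat) : Int) + 11 = ((u.length + i + 11 : Nat) : Int) by push_cast; ring,
          PySem.Chars.slice_eq_listSlice, PySem.List.slice_natCast,
          show u.length + i + 11 = u.length + (i + 11) by omega, List.drop_length_add_append]
        rw [← hs2def]
        congr 1
        omega
      have hF : s2.drop j = pvCloseTag ++ s2.drop (j + 12) := by
        conv_lhs => rw [← List.prefix_iff_eq_append.1 hclose]
        rw [show pvCloseTag.length = 12 from rfl, List.drop_drop]
      have hdropAS : (u ++ r).drop ((((u.length + i + 11 + j : Nat) : Int)).toNat + 1) = pvCloseTail ++ s2.drop (j + 12) := by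
        rw [Int.toNat_natCast,
          show u.length + i + 11 + j + 1 = u.length + ((i + 11) + (j + 1)) by omega,
          List.drop_length_add_append, ← List.drop_drop, ← hs2def,
          ← List.drop_drop, hF, show pvCloseTag = '<' :: pvCloseTail from rfl]
        simp
      rw [pvLoopAS, pvLoopB]
      rw [dif_neg (show ¬PySem.Chars.find (u ++ r) pvOpenTag = -1 by rw [hsival]; omega)]
      rw [hsival, heival]
      rw [dif_neg (by omega : ¬(((u.length + i + 11 + j : Nat) : Int) = -1))]
      rw [dif_neg hA, dif_neg hB]
      rw [hslice, hdropAS]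
      have hlt : (s2.drop (j + 12)).length < r.length := by
        simp only [List.length_drop]
        omega
      exact IH ((s2.drop (j + 12)).length) hlt (s2.drop (j + 12)) _ pvCloseTail (Or.inr rfl) rfl

-- the two answer extractions agree
lemma pv_answer_eq (t : List Char) :
    pvAnswerLoopA t [pvRelTag, pvIrrelTag] =
      (match pvAnswerAfterB t pvRelTag with
        | some a => some a
        | none => pvAnswerAfterB t pvIrrelTag) := by
  simp only [pvAnswerLoopA, pvAnswerAfterB]
  split_ifs <;> first | rfl | tauto

-- ===== VERDICT (by name: the statement is the Claim_ definition above) =====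
theorem extract_paragraphs_and_answer_spec : Claim_equal_extract_paragraphs_and_answer := by
  intro output _
  unfold Spec_extract_paragraphs_and_answer
  unfold extract_paragraphs_and_answer extract_paragraphs_and_answer_alt
  by_cases h : PySem.Chars.isIn pvNRTag output.toList
  · simp [h]
  · simp only [h, if_false]
    have h1 := pv_loopA_shift output.toList 0 [] (Nat.zero_le _)
    rw [List.drop_zero] at h1
    have h2 := pv_loops_eq output.toList [] [] (Or.inl rfl)
    rw [List.nil_append] at h2
    rw [pv_answer_eq, h1, h2]
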